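-- pv_equiv track=rewrite | github.com/adiens916/NOTE-algorithm | SW_Expert_Academy/0817 - String/가장 빠른 문자열 타이핑.py | count_least_typing
-- ===== SOURCE A (Python) =====
-- def count_least_typing(string, word):
--     string_len = len(string)
--     word_len = len(word)
--     count = 0
--
--     base = 0
--     while base < string_len:
--         for offset in range(word_len):
--             # 비교하려는데 길이가 모자라는 경우
--             if base + offset >= string_len:
--                 # 그냥 남은 길이는 일일이 타이핑
--                 count += offset
--                 base += offset
--                 break
--
--             # 길이 비교
--             if string[base + offset] != word[offset]:
--                 # FIXME: 처음부터 틀렸을 때 offset이 0이라 안 밀려남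
--                 # -> 처음을 따로 처리해주기
--                 if offset == 0:
--                     offset = 1
--                 count += offset
--                 base += offset
--                 break
--
--         # 전부 같은 경우 1만큼 증가
--         else:
--             count += 1
--             base += word_len
--
--     return count
-- ===== SOURCE B (Python) =====
-- def count_least_typing(string, word):
--     n, w = len(string), len(word)
--     if w == 0:
--         return n
--     # Stage 1: Z-algorithm on word + sentinel + string precomputes, for every
--     # position j of string, the (capped) longest prefix of word starting there.
--     t = word + "\x00" + string
--     L = n + w + 1
--     z = [0] * L
--     z[0] = L
--     l = r = 0
--     for i in range(1, L):
--         v = min(r - i, z[i - l]) if i < r else 0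
--         while i + v < L and t[v] == t[i + v]:
--             v += 1
--         z[i] = v
--         if i + v > r:
--             l, r = i, i + v
--     # Stage 2: greedy table-driven jump, counting macro uses k; each macro use
--     # saves w-1 keystrokes, so the answer is n - k*(w-1) in closed form.
--     k = 0
--     i = 0
--     while i < n:
--         m = z[w + 1 + i]
--         if m == w:
--             k += 1
--             i += w
--         else:
--             i += m if m else 1
--     return n - k * (w - 1)
-- ===== Notes on version B (the rewrite author's own statement) =====
-- stated objective: alternative
-- what changed: B replaces A's per-position character re-comparison by a two-stage algorithm: a Z-algorithm pass over word+'\x00'+string precomputes every capped prefix-match length, then a table-driven greedy jump returns n - k*(w-1) in closed form; Pre_ excludes word='' with nonempty string, on which A loops forever.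
import Mathlib
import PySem

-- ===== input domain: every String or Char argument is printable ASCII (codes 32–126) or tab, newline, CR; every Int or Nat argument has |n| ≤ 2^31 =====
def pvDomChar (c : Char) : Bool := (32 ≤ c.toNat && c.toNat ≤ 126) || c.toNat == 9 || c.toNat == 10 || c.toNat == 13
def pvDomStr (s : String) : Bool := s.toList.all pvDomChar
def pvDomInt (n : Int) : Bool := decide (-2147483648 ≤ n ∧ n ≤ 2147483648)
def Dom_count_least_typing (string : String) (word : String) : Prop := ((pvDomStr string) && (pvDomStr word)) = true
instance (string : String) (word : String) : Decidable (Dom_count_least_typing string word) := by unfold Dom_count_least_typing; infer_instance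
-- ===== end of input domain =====

-- B replaces A's character-by-character greedy scan by a two-stage algorithm:
-- a Z-algorithm pass over word+sentinel+string precomputes every prefix-match
-- length, then a table-driven greedy jump returns n - k*(w-1) in closed form;
-- objective: alternative.

-- ===== PORT A =====
-- the `for offset in range(word_len)` loop with its two `break`s and the `else:` clause:
-- `some step` = broke with count += step, base += step; `none` = completed (else: branch).
-- indexing string[base+offset]/word[offset] is exact via getElem?: the guards ensure both
-- indices are in range exactly when Python accesses them.
def innerA (s w : List Char) (base : Nat) (offset : Nat) : Option Nat :=
  if h : offset < w.length then
    if s.length ≤ base + offset then some offset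
    else if s[base + offset]? ≠ w[offset]? then
      some (if offset = 0 then 1 else offset)
    else innerA s w base (offset + 1)
  else none
termination_by w.length - offset
decreasing_by omega

-- the `while base < string_len` loop; Python diverges when word = "" and string ≠ ""
-- (base never advances), so fuel s.length is enough on all inputs where A returns.
def loopA (s w : List Char) : Nat → Nat → Int → Int
  | 0, _, count => count
  | fuel+1, base, count =>
    if base < s.length then
      match innerA s w base 0 with
      | some step => loopA s w fuel (base + step) (count + (step : Int))
      | none => loopA s w fuel (base + w.length) (count + 1)
    else count

def count_least_typing (string : String) (word : String) : Int :=
  loopA string.toList word.toList string.toList.length 0 0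

-- ===== PORT B =====
-- Source B's inner `while i + v < L and t[v] == t[i + v]` extension loop of the Z-algorithm
def zExtend (t : List Char) (i : Nat) (v : Nat) : Nat :=
  if h : i + v < t.length ∧ t[v]? = t[i + v]? then zExtend t i (v + 1) else v
termination_by t.length - (i + v)
decreasing_by omega

-- one iteration of Source B's `for i in range(1, L)` Z-loop; state = (z, l, r);
-- all list indices are in range when Python reads/writes them, so getD/set are exact
def zStep (t : List Char) (st : List Nat × Nat × Nat) (i : Nat) : List Nat × Nat × Nat :=
  let z := st.1
  let l := st.2.1
  let r := st.2.2
  let v0 := if i < r then min (r - i) (z.getD (i - l) 0) else 0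
  let v := zExtend t i v0
  let z' := z.set i v
  if r < i + v then (z', i, i + v) else (z', l, r)

-- Source B's Z-array construction: z = [0]*L; z[0] = L; the fold is `for i in range(1, L)`
def zArray (t : List Char) : List Nat :=
  let L := t.length
  ((List.range' 1 (L - 1)).foldl (zStep t) ((List.replicate L 0).set 0 L, 0, 0)).1

-- Source B's final `while i < n` greedy jump loop, accumulating the macro count k
def loopB (s : List Char) (wlen : Nat) (z : List Nat) : Nat → Nat → Int → Int
  | 0, _, k => k
  | fuel+1, i, k =>
    if i < s.length then
      let m := z.getD (wlen + 1 + i) 0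
      if m = wlen then loopB s wlen z fuel (i + wlen) (k + 1)
      else loopB s wlen z fuel (i + (if m = 0 then 1 else m)) k
    else k

def count_least_typing_alt (string : String) (word : String) : Int :=
  let s := string.toList
  let wl := word.toList
  if wl.length = 0 then (s.length : Int)
  else
    let t := wl ++ Char.ofNat 0 :: s
    let z := zArray t
    (s.length : Int) - loopB s wl.length z s.length 0 0 * ((wl.length : Int) - 1)

-- ===== PRECONDITION & SPEC =====
-- Pre_ excludes only word = "" with string ≠ "", on which Python A loops forever
-- (base never advances); A returns on every admitted input.
def Pre_count_least_typing (string : String) (word : String) : Prop :=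
  word ≠ "" ∨ string = ""
instance (string : String) (word : String) : Decidable (Pre_count_least_typing string word) := by
  unfold Pre_count_least_typing; infer_instance

def pvWitness_count_least_typing : String × String := ("banana", "ban")

def Spec_count_least_typing (string : String) (word : String) (out : Int) : Prop := out = count_least_typing_alt string word
instance (string : String) (word : String) (out : Int) : Decidable (Spec_count_least_typing string word out) := by unfold Spec_count_least_typing; infer_instance

-- ===== CLAIM (what is proved, stated in full; the proofs are below) =====
def Claim_equal_count_least_typing : Prop := ∀ (string : String) (word : String), Dom_count_least_typing string word → Pre_count_least_typing string word → Spec_count_least_typing string word (count_least_typing string word)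

-- ===== LEMMAS AND PROOFS =====

-- proof-side helper: the longest-common-prefix length of two character lists
def lcpLen : List Char → List Char → Nat
  | a :: as, b :: bs => if a = b then lcpLen as bs + 1 else 0
  | _, _ => 0

-- proof-side helper: the capped prefix-match length A's inner loop effectively computes
def lcpB (s w : List Char) (i : Nat) (m : Nat) : Nat :=
  if h : m < w.length ∧ i + m < s.length ∧ s[i + m]? = w[m]? then
    lcpB s w i (m + 1)
  else m
termination_by w.length - m
decreasing_by omega

def Zf (t : List Char) (i : Nat) : Nat := lcpLen t (t.drop i)

theorem lcp_le_right (a b : List Char) : lcpLen a b ≤ b.length := by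
  induction a generalizing b with
  | nil => simp [lcpLen]
  | cons x xs ih =>
    cases b with
    | nil => simp [lcpLen]
    | cons y ys =>
      by_cases h : x = y
      · simpa [lcpLen, h] using ih ys
      · simp [lcpLen, h]

theorem lcp_match (a b : List Char) : ∀ j < lcpLen a b, a[j]? = b[j]? := by
  induction a generalizing b with
  | nil => simp [lcpLen]
  | cons x xs ih =>
    cases b with
    | nil => simp [lcpLen]
    | cons y ys =>
      intro j hj
      by_cases h : x = y
      · cases j with
        | zero => simp [h]
        | succ j' =>
          simp only [lcpLen, if_pos h] at hj
          simpa using ih ys j' (by omega)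
      · simp [lcpLen, h] at hj
  
theorem lcp_stop (a b : List Char) (h : lcpLen a b < b.length) :
    a[lcpLen a b]? ≠ b[lcpLen a b]? := by
  induction a generalizing b with
  | nil =>
    cases b with
    | nil => simp at h
    | cons y ys => simp [lcpLen]
  | cons x xs ih =>
    cases b with
    | nil => simp at h
    | cons y ys =>
      by_cases hxy : x = y
      · simp only [lcpLen, if_pos hxy, List.length_cons] at h ⊢
        simpa using ih ys (by omega)
      · simp [lcpLen, hxy]

theorem lcp_ge (a b : List Char) (v : Nat)
    (h : ∀ j < v, j < b.length ∧ a[j]? = b[j]?) : v ≤ lcpLen a b := by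
  by_contra hlt
  push Not at hlt
  obtain ⟨hb, heq⟩ := h (lcpLen a b) hlt
  exact lcp_stop a b hb heq

theorem lcp_self (a : List Char) : lcpLen a a = a.length := by
  induction a with
  | nil => simp [lcpLen]
  | cons x xs ih => simp [lcpLen, ih]

theorem Zf_le (t : List Char) (i : Nat) (h : i ≤ t.length) : i + Zf t i ≤ t.length := by
  have := lcp_le_right t (t.drop i)
  simp only [Zf, List.length_drop] at this ⊢
  omega

theorem zExtend_eq (t : List Char) (i : Nat) :
    ∀ v, v ≤ Zf t i → zExtend t i v = Zf t i := by
  intro v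
  induction v using zExtend.induct t i with
  | case1 v h ih =>
    intro hv
    obtain ⟨hvr, hveq⟩ := h
    rw [zExtend, dif_pos ⟨hvr, hveq⟩]
    apply ih
    -- show v + 1 ≤ Zf t i
    apply lcp_ge
    intro j hj
    simp only [Zf] at hv
    rcases Nat.lt_succ_iff_lt_or_eq.mp hj with hj' | hj'
    · exact ⟨by have := lcp_le_right t (t.drop i); omega,
        lcp_match t (t.drop i) j (by omega)⟩
    · subst hj'
      refine ⟨by simp only [List.length_drop]; omega, ?_⟩
      rw [List.getElem?_drop]
      exact hveq
  | case2 v h =>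
    intro hv
    rw [zExtend, dif_neg h]
    by_contra hne
    have hlt : v < Zf t i := by omega
    have hb : v < (t.drop i).length := lt_of_lt_of_le hlt (lcp_le_right _ _)
    have hm := lcp_match t (t.drop i) v hlt
    rw [List.getElem?_drop] at hm
    simp at hb
    exact h ⟨by omega, hm⟩

-- invariant of Source B's Z-loop before processing index i
def ZInv (t : List Char) (i : Nat) (st : List Nat × Nat × Nat) : Prop :=
  st.1.length = t.length ∧
  (∀ j < i, st.1.getD j 0 = Zf t j) ∧
  st.2.1 < i ∧ st.2.2 ≤ t.length ∧
  (∀ p < st.2.2 - st.2.1, t[st.2.1 + p]? = t[p]?) ∧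
  (st.2.1 = 0 → st.2.2 = 0)

theorem zStep_inv (t : List Char) (i : Nat) (st : List Nat × Nat × Nat)
    (hi : 1 ≤ i) (hiL : i < t.length) (h : ZInv t i st) :
    ZInv t (i + 1) (zStep t st i) := by
  obtain ⟨hlen, hz, hl, hr, hwin, hl0⟩ := h
  obtain ⟨z, l, r⟩ := st
  simp only at hlen hz hl hr hwin hl0
  have hv0 : (if i < r then min (r - i) (z.getD (i - l) 0) else 0) ≤ Zf t i := by
    split
    · next hir =>
      have hl1 : 1 ≤ l := by
        by_cases hle : l = 0
        · have := hl0 hle; omega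
        · omega
      have hil : i - l < i := by omega
      have hzl : z.getD (i - l) 0 = Zf t (i - l) := hz _ hil
      rw [hzl]
      apply lcp_ge
      intro j hj
      have hj1 : j < r - i := by omega
      have hj2 : j < Zf t (i - l) := by omega
      constructor
      · simp only [List.length_drop]; omega
      · have h1 : t[j]? = t[(i - l) + j]? := by
          have := lcp_match t (t.drop (i - l)) j hj2
          rwa [List.getElem?_drop] at this
        have h2 : t[l + ((i - l) + j)]? = t[(i - l) + j]? := hwin _ (by omega)
        have h3 : l + ((i - l) + j) = i + j := by omega
        rw [List.getElem?_drop, h1, ← h3, h2]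
    · omega
  set v0 := (if i < r then min (r - i) (z.getD (i - l) 0) else 0) with hv0def
  have hzv : zExtend t i v0 = Zf t i := zExtend_eq t i v0 hv0
  have hZle : i + Zf t i ≤ t.length := Zf_le t i (le_of_lt hiL)
  unfold zStep
  simp only [← hv0def, hzv]
  have hset_len : (z.set i (Zf t i)).length = t.length := by simp [hlen]
  have hset_get : ∀ j < i + 1, (z.set i (Zf t i)).getD j 0 = Zf t j := by
    intro j hj
    rcases Nat.lt_succ_iff_lt_or_eq.mp hj with hj' | hj'
    · rw [List.getD, List.getElem?_set_ne (by omega)]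
      exact hz _ hj'
    · subst hj'
      rw [List.getD, List.getElem?_set_self (by omega), Option.getD_some]
  split
  · next hrlt =>
    refine ⟨hset_len, hset_get, ?_, ?_, ?_, ?_⟩
    · show i < i + 1
      omega
    · show i + Zf t i ≤ t.length
      exact hZle
    · intro p hp
      replace hp : p < i + Zf t i - i := hp
      have hp2 : p < Zf t i := by omega
      show t[i + p]? = t[p]?
      have := lcp_match t (t.drop i) p hp2
      rw [List.getElem?_drop] at this
      exact this.symm
    · intro hi0
      have h0 : i = 0 := hi0
      omega
  · exact ⟨hset_len, hset_get, Nat.lt_succ_of_lt hl, hr, hwin, hl0⟩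

theorem zFold_inv (t : List Char) :
    ∀ (len a : Nat) (st : List Nat × Nat × Nat), 1 ≤ a → a + len ≤ t.length →
      ZInv t a st → ZInv t (a + len) ((List.range' a len).foldl (zStep t) st) := by
  intro len
  induction len with
  | zero => intro a st _ _ h; simpa using h
  | succ k ih =>
    intro a st ha hle h
    rw [List.range'_succ, List.foldl_cons]
    have := ih (a + 1) (zStep t st a) (by omega) (by omega)
      (zStep_inv t a st ha (by omega) h)
    simpa [Nat.add_assoc, Nat.add_comm 1 k] using this

theorem zArray_eq (t : List Char) (ht : t ≠ []) :
    ∀ j < t.length, (zArray t).getD j 0 = Zf t j := by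
  have hL : 1 ≤ t.length := by
    cases t with
    | nil => simp at ht
    | cons => simp
  have hinit : ZInv t 1 ((List.replicate t.length 0).set 0 t.length, 0, 0) := by
    refine ⟨by simp, ?_, Nat.zero_lt_one, Nat.zero_le _, fun p hp => absurd (show p < 0 - 0 from hp) (by omega), fun _ => rfl⟩
    intro j hj
    have : j = 0 := by omega
    subst this
    rw [List.getD, List.getElem?_set_self (by simp; omega), Option.getD_some]
    simp [Zf, lcp_self]
  have := zFold_inv t (t.length - 1) 1 _ (by omega) (by omega) hinit
  have h1 : 1 + (t.length - 1) = t.length := by omega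
  rw [h1] at this
  intro j hj
  exact this.2.1 j hj

-- the sentinel: lcpLen through word++sentinel equals lcpLen with word alone,
-- when the other side contains no NUL character
theorem lcp_sentinel (wl rest u : List Char) (hu : ∀ c ∈ u, c ≠ Char.ofNat 0) :
    lcpLen (wl ++ Char.ofNat 0 :: rest) u = lcpLen wl u := by
  induction wl generalizing u with
  | nil =>
    cases u with
    | nil => simp [lcpLen]
    | cons c cs =>
      have : Char.ofNat 0 ≠ c := fun h => (hu c (by simp)) h.symm
      simp [lcpLen, this]
  | cons a as ih =>
    cases u with
    | nil => simp [lcpLen]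
    | cons c cs =>
      by_cases hac : a = c
      · simp [lcpLen, hac, ih cs (fun x hx => hu x (by simp [hx]))]
      · simp [lcpLen, hac]

theorem lcpB_eq_lcpLen (s w : List Char) (i : Nat) :
    ∀ m, lcpB s w i m = m + lcpLen (w.drop m) (s.drop (i + m)) := by
  intro m
  induction m using lcpB.induct s w i with
  | case1 m h ih =>
    rw [lcpB, dif_pos h]
    obtain ⟨hmw, hms, heq⟩ := h
    have hw : w.drop m = w[m] :: w.drop (m + 1) := List.drop_eq_getElem_cons hmw
    have hs : s.drop (i + m) = s[i + m] :: s.drop (i + m + 1) := List.drop_eq_getElem_cons hms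
    have hch : w[m] = s[i + m] := by
      have h1 : s[i + m]? = some s[i + m] := List.getElem?_eq_getElem hms
      have h2 : w[m]? = some w[m] := List.getElem?_eq_getElem hmw
      rw [h1, h2] at heq
      exact (Option.some.inj heq).symm
    have h3 : i + (m + 1) = i + m + 1 := by omega
    rw [ih, h3, hw, hs]
    simp only [lcpLen, if_pos hch]
    omega
  | case2 m h =>
    rw [lcpB, dif_neg h]
    push Not at h
    by_cases h1 : m < w.length
    · by_cases h2 : i + m < s.length
      · have hne := h h1 h2
        have hw : w.drop m = w[m] :: w.drop (m + 1) := List.drop_eq_getElem_cons h1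
        have hs : s.drop (i + m) = s[i + m] :: s.drop (i + m + 1) := List.drop_eq_getElem_cons h2
        have hch : s[i + m] ≠ w[m] := by
          intro hc
          apply hne
          rw [List.getElem?_eq_getElem h2, List.getElem?_eq_getElem h1, hc]
        have hch' : w[m] ≠ s[i + m] := Ne.symm hch
        rw [hw, hs]
        simp [lcpLen, hch']
      · rw [show s.drop (i + m) = [] from List.drop_eq_nil_of_le (by omega)]
        cases w.drop m <;> simp [lcpLen]
    · rw [show w.drop m = [] from List.drop_eq_nil_of_le (by omega)]
      simp [lcpLen]

-- the Z-table entry at position w+1+j is exactly A's capped match length at j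
theorem ztable_eq (s wl : List Char)
    (hs : ∀ c ∈ s, c ≠ Char.ofNat 0) :
    ∀ j < s.length,
      (zArray (wl ++ Char.ofNat 0 :: s)).getD (wl.length + 1 + j) 0 = lcpB s wl j 0 := by
  intro j hj
  set t := wl ++ Char.ofNat 0 :: s with htdef
  have htlen : t.length = wl.length + 1 + s.length := by simp [htdef]; omega
  have hidx : wl.length + 1 + j < t.length := by omega
  rw [zArray_eq t (by simp [htdef]) _ hidx]
  have hdrop : t.drop (wl.length + 1 + j) = s.drop j := by
    have h1 : wl.length + 1 + j = wl.length + (j + 1) := by omega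
    have h2 : wl.length + (j + 1) - wl.length = j + 1 := by omega
    rw [htdef, h1, List.drop_append, h2, List.drop_succ_cons,
        show List.drop (wl.length + (j + 1)) wl = [] from List.drop_eq_nil_of_le (by omega)]
    simp
  unfold Zf
  rw [hdrop, htdef, lcp_sentinel wl s (s.drop j)
    (fun c hc => hs c (List.mem_of_mem_drop hc))]
  rw [lcpB_eq_lcpLen s wl j 0]
  simp

-- ===== A-side characterisation (inner loop = capped lcp) =====

theorem lcpB_ge_start (s w : List Char) (i : Nat) : ∀ j, j ≤ lcpB s w i j := by
  intro j
  induction j using lcpB.induct s w i with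
  | case1 j h ih => rw [lcpB, dif_pos h]; omega
  | case2 j h => rw [lcpB, dif_neg h]

theorem lcpB_bound (s w : List Char) (i : Nat) :
    ∀ j, j < lcpB s w i j → i + lcpB s w i j ≤ s.length := by
  intro j
  induction j using lcpB.induct s w i with
  | case1 j h ih =>
    rw [lcpB, dif_pos h]
    intro _
    by_cases h2 : j + 1 < lcpB s w i (j + 1)
    · exact ih h2
    · have := lcpB_ge_start s w i (j + 1)
      have : lcpB s w i (j + 1) = j + 1 := by omega
      omega
  | case2 j h => rw [lcpB, dif_neg h]; omega

theorem inner_eq (s w : List Char) (base : Nat) (hb : base < s.length) :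
    ∀ j, j ≤ w.length →
      innerA s w base j =
        (if lcpB s w base j = w.length then none
         else some (if lcpB s w base j = 0 then 1 else lcpB s w base j)) := by
  intro j
  induction j using lcpB.induct s w base with
  | case1 j h ih =>
    intro _
    rw [lcpB, dif_pos h, innerA, dif_pos h.1]
    rw [if_neg (by omega), if_neg (by simp [h.2.2])]
    exact ih (by omega)
  | case2 j h =>
    intro hj
    rw [lcpB, dif_neg h, innerA]
    push Not at h
    by_cases hjw : j < w.length
    · rw [dif_pos hjw]
      have hjw' : j ≠ w.length := by omega
      by_cases hrun : s.length ≤ base + j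
      · have hj0 : j ≠ 0 := by omega
        rw [if_pos hrun]
        simp [hj0, hjw']
      · have hne : s[base + j]? ≠ w[j]? := h hjw (by omega)
        rw [if_neg hrun, if_pos hne]
        simp [hjw']
    · have : j = w.length := by omega
      rw [dif_neg hjw, if_pos this]

theorem loopB_add (s : List Char) (wlen : Nat) (z : List Nat) :
    ∀ fuel i k, loopB s wlen z fuel i k = loopB s wlen z fuel i 0 + k := by
  intro fuel
  induction fuel with
  | zero => intro i k; simp [loopB]
  | succ f ih =>
    intro i k
    simp only [loopB]
    split
    · split
      · rw [ih _ (k + 1), ih _ (0 + 1)]; ring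
      · exact ih _ k
    · ring

theorem main_loop (s w : List Char) (z : List Nat) (hw : 0 < w.length)
    (htab : ∀ j < s.length, z.getD (w.length + 1 + j) 0 = lcpB s w j 0) :
    ∀ fuel base count, base ≤ s.length → s.length - base ≤ fuel →
      loopA s w fuel base count =
        count + ((s.length - base : Nat) : Int)
          - loopB s w.length z fuel base 0 * ((w.length : Int) - 1) := by
  intro fuel
  induction fuel with
  | zero =>
    intro base count hb hf
    have : base = s.length := by omega
    simp [loopA, loopB, this]
  | succ f ih =>
    intro base count hb hf
    by_cases hlt : base < s.length
    · have hin := inner_eq s w base hlt 0 (by omega)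
      have htb := htab base hlt
      set m := lcpB s w base 0 with hm
      by_cases hmw : m = w.length
      · -- full match: macro step
        have hbw : base + w.length ≤ s.length := by
          have := lcpB_bound s w base 0
          rw [← hm] at this
          have := this (by omega)
          omega
        rw [if_pos hmw] at hin
        have hA : loopA s w (f+1) base count = loopA s w f (base + w.length) (count + 1) := by
          rw [loopA, if_pos hlt, hin]
        have hB : loopB s w.length z (f+1) base 0 = loopB s w.length z f (base + w.length) 0 + 1 := by
          simp only [loopB]
          rw [if_pos hlt]
          simp only [htb, if_pos hmw]
          rw [loopB_add]
          norm_num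
        rw [hA, hB, ih _ _ (by omega) (by omega)]
        have h1 : ((s.length - base : Nat) : Int) = ((s.length - (base + w.length) : Nat) : Int) + w.length := by
          omega
        rw [h1]; ring
      · -- mismatch / run out: type (if m = 0 then 1 else m) chars
        rw [if_neg hmw] at hin
        have hstep1 : 1 ≤ (if m = 0 then 1 else m) := by split <;> omega
        have hbnd : base + (if m = 0 then 1 else m) ≤ s.length := by
          by_cases h0 : m = 0
          · simp [h0]; omega
          · have := lcpB_bound s w base 0
            rw [← hm] at this
            have hg := lcpB_ge_start s w base 0
            have := this (by omega)
            simp [h0]; omega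
        have hA : loopA s w (f+1) base count = loopA s w f (base + (if m = 0 then 1 else m)) (count + ((if m = 0 then 1 else m : Nat) : Int)) := by
          rw [loopA, if_pos hlt, hin]
        have hB : loopB s w.length z (f+1) base 0 = loopB s w.length z f (base + (if m = 0 then 1 else m)) 0 := by
          simp only [loopB]
          rw [if_pos hlt]
          simp only [htb, if_neg hmw]
        rw [hA, hB, ih _ _ (by omega) (by omega)]
        have h1 : ((s.length - base : Nat) : Int) = ((s.length - (base + (if m = 0 then 1 else m)) : Nat) : Int) + ((if m = 0 then 1 else m : Nat) : Int) := by
          omega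
        rw [h1]; ring
    · have : base = s.length := by omega
      simp [loopA, loopB, this]

-- ===== VERDICT (by name: the statement is the Claim_ definition above) =====
theorem count_least_typing_spec : Claim_equal_count_least_typing := by
  intro string word hdom hpre
  unfold Spec_count_least_typing count_least_typing count_least_typing_alt
  by_cases hw : word.toList.length = 0
  · have hwe : word = "" := by
      have h0 : word.toList = [] := List.length_eq_zero_iff.mp hw
      exact String.toList_inj.mp (by simp [h0])
    have hse : string = "" := by
      rcases hpre with h | h
      · exact absurd hwe h
      · exact h
    subst hse
    simp [loopA, hw]
  · simp only [if_neg hw]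
    have hnoNul : ∀ c ∈ string.toList, c ≠ Char.ofNat 0 := by
      intro c hc hc0
      unfold Dom_count_least_typing pvDomStr at hdom
      simp [List.all_eq_true] at hdom
      have := hdom.1 c hc
      rw [hc0] at this
      simp [pvDomChar] at this
    have htab := ztable_eq string.toList word.toList hnoNul
    rw [main_loop string.toList word.toList _ (by omega) htab
      string.toList.length 0 0 (by omega) (by omega)]
    simp
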